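-- pv_equiv track=rewrite | github.com/FragileTech/fragile | src/tools/transform_ns_to_myst.py | replace_citations
-- ===== SOURCE A (Python) =====
-- def replace_citations(line: str) -> str:
--     """Replace [1], [2], etc. with [@cite]."""
--     citation_map = {
--         '[1]': '[@beale1984]',
--         '[2]': '[@constantin1993]',
--         '[3]': '[@moffatt1992]',
--         '[4]': '[@tao2016]',
--         '[5]': '[@luo2014]',
--         '[6]': '[@escauriaza2003]',
--         '[7]': '[@benjamin1962]',
--         '[8]': '[@caffarelli1982]',
--         '[9]': '[@lin1998]',
--         '[10]': '[@naber2017]',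
--         '[11]': '[@seregin2012]',
--         '[12]': '[@bianchi1991]',
--         '[13]': '[@dolbeault2024]',
--     }
--
--     for old, new in citation_map.items():
--         line = line.replace(old, new)
--
--     return line
-- ===== SOURCE B (Python) =====
-- CITATION_KEYS = [
--     'beale1984', 'constantin1993', 'moffatt1992', 'tao2016', 'luo2014',
--     'escauriaza2003', 'benjamin1962', 'caffarelli1982', 'lin1998',
--     'naber2017', 'seregin2012', 'bianchi1991', 'dolbeault2024',
-- ]
--
-- CITATION_MAP = {'[%d]' % i: '[@%s]' % key for i, key in enumerate(CITATION_KEYS, 1)}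
--
--
-- def replace_citations(line: str) -> str:
--     """Replace [1], [2], etc. with [@cite] in a single left-to-right scan."""
--     out = []
--     i = 0
--     n = len(line)
--     while i < n:
--         for old, new in CITATION_MAP.items():
--             if line.startswith(old, i):
--                 out.append(new)
--                 i += len(old)
--                 break
--         else:
--             out.append(line[i])
--             i += 1
--     return ''.join(out)
-- ===== Notes on version B (the rewrite author's own statement) =====
-- stated objective: alternative
-- what changed: Replaces A's 13 sequential whole-string replace passes with a single left-to-right scan that, at each position, tries the citation keys as prefixes and substitutes in place; correctness relies on no key occurring inside another key or inside any replacement.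
import Mathlib
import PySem

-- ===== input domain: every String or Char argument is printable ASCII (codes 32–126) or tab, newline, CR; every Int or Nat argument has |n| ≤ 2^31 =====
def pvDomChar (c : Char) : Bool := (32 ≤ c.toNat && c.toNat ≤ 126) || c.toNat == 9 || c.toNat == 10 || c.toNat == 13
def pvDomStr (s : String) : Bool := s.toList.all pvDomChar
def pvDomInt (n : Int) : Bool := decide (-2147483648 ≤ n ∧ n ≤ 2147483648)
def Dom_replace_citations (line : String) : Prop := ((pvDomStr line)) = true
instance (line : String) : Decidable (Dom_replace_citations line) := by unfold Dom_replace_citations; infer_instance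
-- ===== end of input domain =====

-- B replaces A's 13 sequential whole-string replace passes by ONE left-to-right scan that
-- substitutes each citation key where it matches (objective: alternative single-pass algorithm).

-- ===== PORT A =====
-- A's citation_map dict → association list in insertion order
def pvCitationMap : List (String × String) :=
  [("[1]", "[@beale1984]"),
   ("[2]", "[@constantin1993]"),
   ("[3]", "[@moffatt1992]"),
   ("[4]", "[@tao2016]"),
   ("[5]", "[@luo2014]"),
   ("[6]", "[@escauriaza2003]"),
   ("[7]", "[@benjamin1962]"),
   ("[8]", "[@caffarelli1982]"),
   ("[9]", "[@lin1998]"),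
   ("[10]", "[@naber2017]"),
   ("[11]", "[@seregin2012]"),
   ("[12]", "[@bianchi1991]"),
   ("[13]", "[@dolbeault2024]")]

-- A: for old, new in citation_map.items(): line = line.replace(old, new)
def replace_citations (line : String) : String :=
  pvCitationMap.foldl (fun l pr => PySem.Str.replace l pr.1 pr.2) line

-- ===== PORT B =====
-- B's CITATION_KEYS list and the CITATION_MAP comprehension
-- {'[%d]' % i: '[@%s]' % key for i, key in enumerate(CITATION_KEYS, 1)},
-- held over code points (the scan works on the characters)
def pvCitationKeys : List String :=
  ["beale1984", "constantin1993", "moffatt1992", "tao2016", "luo2014",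
   "escauriaza2003", "benjamin1962", "caffarelli1982", "lin1998",
   "naber2017", "seregin2012", "bianchi1991", "dolbeault2024"]

def pvTableB : List (List Char × List Char) :=
  (PySem.List.enumerate pvCitationKeys 1).map
    (fun ik => (("[" ++ PySem.Int.toStr ik.1 ++ "]").toList,
                ("[@" ++ ik.2 ++ "]").toList))

-- B's while-loop: at each position try the keys in map order (line.startswith(old, i));
-- on a match emit the replacement and advance by len(old), else emit the character.
def pvScan (T : List (List Char × List Char)) : List Char → List Char
  | [] => []
  | c :: t =>
    match T.find? (fun pr => pr.1.isPrefixOf (c :: t)) with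
    | some pr => pr.2 ++ pvScan T (List.drop (pr.1.length - 1) t)
    | none => c :: pvScan T t
termination_by s => s.length
decreasing_by
  · simp only [List.length_drop, List.length_cons]; omega
  · simp only [List.length_cons]; omega

def replace_citations_alt (line : String) : String :=
  String.ofList (pvScan pvTableB line.toList)

-- ===== PRECONDITION & SPEC =====
def Spec_replace_citations (line : String) (out : String) : Prop := out = replace_citations_alt line
instance (line : String) (out : String) : Decidable (Spec_replace_citations line out) := by unfold Spec_replace_citations; infer_instance

-- ===== CLAIM (what is proved, stated in full; the proofs are below) =====
def Claim_equal_replace_citations : Prop := ∀ (line : String), Dom_replace_citations line → Spec_replace_citations line (replace_citations line)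

-- ===== LEMMAS AND PROOFS =====

-- One Python-style replace pass for the nonempty pattern p0 :: pt.
def pvRepl (p0 : Char) (pt r : List Char) : List Char → List Char
  | [] => []
  | c :: t =>
    if (p0 :: pt).isPrefixOf (c :: t) then r ++ pvRepl p0 pt r (List.drop pt.length t)
    else c :: pvRepl p0 pt r t
termination_by s => s.length
decreasing_by
  · simp only [List.length_drop, List.length_cons]; omega
  · simp only [List.length_cons]; omega

lemma pvRepl_nil (p0 : Char) (pt r : List Char) : pvRepl p0 pt r [] = [] := by
  rw [pvRepl.eq_def]

lemma pvRepl_cons (p0 : Char) (pt r : List Char) (c : Char) (t : List Char) :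
    pvRepl p0 pt r (c :: t) =
      if (p0 :: pt).isPrefixOf (c :: t) then r ++ pvRepl p0 pt r (List.drop pt.length t)
      else c :: pvRepl p0 pt r t := by
  rw [pvRepl.eq_def]

lemma pvScan_nil' (T : List (List Char × List Char)) : pvScan T [] = [] := by
  rw [pvScan.eq_def]

lemma pvScan_cons_some (T : List (List Char × List Char)) (c : Char) (t : List Char)
    (pr : List Char × List Char)
    (h : T.find? (fun pr => pr.1.isPrefixOf (c :: t)) = some pr) :
    pvScan T (c :: t) = pr.2 ++ pvScan T (List.drop (pr.1.length - 1) t) := by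
  rw [pvScan.eq_def]; simp [h]

lemma pvScan_cons_none (T : List (List Char × List Char)) (c : Char) (t : List Char)
    (h : T.find? (fun pr => pr.1.isPrefixOf (c :: t)) = none) :
    pvScan T (c :: t) = c :: pvScan T t := by
  rw [pvScan.eq_def]; simp [h]

-- One replace pass, patterns as whole lists (empty pattern never used).
def pvReplP (p r : List Char) (s : List Char) : List Char :=
  match p with
  | [] => s
  | p0 :: pt => pvRepl p0 pt r s

-- shapes that make the 13 passes independent of each other
def pvPatOK (p : List Char) : Prop :=
  ∃ b, p = '[' :: b ++ [']'] ∧ b ≠ [] ∧ '[' ∉ b ∧ '@' ∉ b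

def pvRepOK (r : List Char) : Prop :=
  ∃ u, r = '[' :: '@' :: u ∧ '[' ∉ u

def pvGood (T : List (List Char × List Char)) : Prop :=
  ∀ pr ∈ T, pvPatOK pr.1 ∧ pvRepOK pr.2

def pvTableLit : List (List Char × List Char) :=
  [("[1]".toList, "[@beale1984]".toList),
   ("[2]".toList, "[@constantin1993]".toList),
   ("[3]".toList, "[@moffatt1992]".toList),
   ("[4]".toList, "[@tao2016]".toList),
   ("[5]".toList, "[@luo2014]".toList),
   ("[6]".toList, "[@escauriaza2003]".toList),
   ("[7]".toList, "[@benjamin1962]".toList),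
   ("[8]".toList, "[@caffarelli1982]".toList),
   ("[9]".toList, "[@lin1998]".toList),
   ("[10]".toList, "[@naber2017]".toList),
   ("[11]".toList, "[@seregin2012]".toList),
   ("[12]".toList, "[@bianchi1991]".toList),
   ("[13]".toList, "[@dolbeault2024]".toList)]

lemma pvTableB_eq_lit : pvTableB = pvTableLit := by decide

lemma pvGood_concrete : pvGood pvTableB := by
  rw [pvTableB_eq_lit]
  intro pr h
  fin_cases h
  · exact ⟨⟨['1'], by decide, by decide, by decide, by decide⟩, ⟨"beale1984]".toList, by decide, by decide⟩⟩
  · exact ⟨⟨['2'], by decide, by decide, by decide, by decide⟩, ⟨"constantin1993]".toList, by decide, by decide⟩⟩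
  · exact ⟨⟨['3'], by decide, by decide, by decide, by decide⟩, ⟨"moffatt1992]".toList, by decide, by decide⟩⟩
  · exact ⟨⟨['4'], by decide, by decide, by decide, by decide⟩, ⟨"tao2016]".toList, by decide, by decide⟩⟩
  · exact ⟨⟨['5'], by decide, by decide, by decide, by decide⟩, ⟨"luo2014]".toList, by decide, by decide⟩⟩
  · exact ⟨⟨['6'], by decide, by decide, by decide, by decide⟩, ⟨"escauriaza2003]".toList, by decide, by decide⟩⟩
  · exact ⟨⟨['7'], by decide, by decide, by decide, by decide⟩, ⟨"benjamin1962]".toList, by decide, by decide⟩⟩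
  · exact ⟨⟨['8'], by decide, by decide, by decide, by decide⟩, ⟨"caffarelli1982]".toList, by decide, by decide⟩⟩
  · exact ⟨⟨['9'], by decide, by decide, by decide, by decide⟩, ⟨"lin1998]".toList, by decide, by decide⟩⟩
  · exact ⟨⟨['1','0'], by decide, by decide, by decide, by decide⟩, ⟨"naber2017]".toList, by decide, by decide⟩⟩
  · exact ⟨⟨['1','1'], by decide, by decide, by decide, by decide⟩, ⟨"seregin2012]".toList, by decide, by decide⟩⟩
  · exact ⟨⟨['1','2'], by decide, by decide, by decide, by decide⟩, ⟨"bianchi1991]".toList, by decide, by decide⟩⟩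
  · exact ⟨⟨['1','3'], by decide, by decide, by decide, by decide⟩, ⟨"dolbeault2024]".toList, by decide, by decide⟩⟩

-- ---- bridging PySem.Chars.replace to pvRepl ----
lemma pvGo_eq (p0 : Char) (pt r : List Char) :
    ∀ (fuel : Nat) (l acc : List Char), l.length ≤ fuel →
      PySem.Chars.replace.go (p0 :: pt) r fuel l acc = acc.reverse ++ pvRepl p0 pt r l := by
  intro fuel
  induction fuel with
  | zero =>
    intro l acc h
    have hl : l = [] := by cases l <;> simp_all
    subst hl
    simp [PySem.Chars.replace.go, pvRepl_nil]
  | succ n ih =>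
    intro l acc h
    cases l with
    | nil => simp [PySem.Chars.replace.go, pvRepl_nil]
    | cons c t =>
      by_cases hp : (p0 :: pt).isPrefixOf (c :: t)
      · simp only [PySem.Chars.replace.go, pvRepl_cons, hp, if_true]
        rw [ih (List.drop (p0 :: pt).length (c :: t)) (r.reverse ++ acc) (by
          simp only [List.length_drop, List.length_cons] at h ⊢
          omega)]
        simp [List.drop_succ_cons]
      · simp only [PySem.Chars.replace.go, pvRepl_cons, hp]
        rw [ih t (c :: acc) (by simp only [List.length_cons] at h; omega)]
        simp

lemma pvChars_replace_eq (p0 : Char) (pt r s : List Char) :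
    PySem.Chars.replace s (p0 :: pt) r = pvRepl p0 pt r s := by
  rw [PySem.Chars.replace]
  simp only [List.isEmpty_cons, if_false, Bool.false_eq_true]
  simpa using pvGo_eq p0 pt r s.length s [] (le_refl _)

-- ---- structural facts about pvRepl ----
lemma pvPrefix_repl_iff (pt u : List Char) :
    ∀ (s b : List Char), '[' ∉ b →
      (b <+: pvRepl '[' pt ('[' :: u) s ↔ b <+: s) := by
  intro s
  induction s with
  | nil => intro b _; rw [pvRepl_nil]
  | cons c t ih =>
    intro b hb
    rw [pvRepl_cons]
    by_cases hp : ('[' :: pt).isPrefixOf (c :: t)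
    · simp only [hp, if_true]
      constructor
      · intro hpre
        cases b with
        | nil => exact List.nil_prefix
        | cons x b' =>
          exfalso
          obtain ⟨hx, -⟩ := List.cons_prefix_cons.mp hpre
          exact hb (hx ▸ List.mem_cons_self)
      · intro hpre
        cases b with
        | nil => exact List.nil_prefix
        | cons x b' =>
          exfalso
          obtain ⟨hc, -⟩ := List.cons_prefix_cons.mp (List.isPrefixOf_iff_prefix.mp hp)
          obtain ⟨hx, -⟩ := List.cons_prefix_cons.mp hpre
          exact hb (by simp [hx, ← hc])
    · simp only [hp]
      cases b with
      | nil => simp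
      | cons x b' =>
        have hb' : '[' ∉ b' := fun h => hb (List.mem_cons_of_mem _ h)
        constructor
        · intro hpre
          obtain ⟨hx, hpre'⟩ := List.cons_prefix_cons.mp hpre
          exact List.cons_prefix_cons.mpr ⟨hx, (ih b' hb').mp hpre'⟩
        · intro hpre
          obtain ⟨hx, hpre'⟩ := List.cons_prefix_cons.mp hpre
          exact List.cons_prefix_cons.mpr ⟨hx, (ih b' hb').mpr hpre'⟩

lemma pvRepl_skip (pt r : List Char) :
    ∀ (b s t2 : List Char), '[' ∉ b → s = b ++ t2 →
      pvRepl '[' pt r s = b ++ pvRepl '[' pt r t2 := by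
  intro b
  induction b with
  | nil => intro s t2 _ h; simp [h]
  | cons x b' ih =>
    intro s t2 hb h
    subst h
    have hx : x ≠ '[' := fun h => hb (h ▸ List.mem_cons_self)
    rw [List.cons_append, pvRepl_cons, if_neg]
    · have hb' : '[' ∉ b' := fun h => hb (List.mem_cons_of_mem _ h)
      rw [ih _ _ hb' rfl]
      simp
    · intro hpre
      obtain ⟨hc, -⟩ := List.cons_prefix_cons.mp (List.isPrefixOf_iff_prefix.mp hpre)
      exact hx hc.symm

-- ---- structural facts about pvScan ----
lemma pvScan_nil_table (s : List Char) : pvScan [] s = s := by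
  induction s with
  | nil => exact pvScan_nil' []
  | cons c t ih => rw [pvScan_cons_none [] c t (by simp), ih]

lemma pvFind?_congr {α : Type} (l : List α) (f g : α → Bool) (h : ∀ x ∈ l, f x = g x) :
    l.find? f = l.find? g := by
  induction l with
  | nil => rfl
  | cons a l ih =>
    have ha := h a List.mem_cons_self
    by_cases hf : f a
    · rw [List.find?_cons_of_pos hf, List.find?_cons_of_pos (ha ▸ hf)]
    · rw [List.find?_cons_of_neg (by simpa using hf),
        List.find?_cons_of_neg (by rw [← ha]; simpa using hf)]
      exact ih (fun x hx => h x (List.mem_cons_of_mem _ hx))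

lemma pvScan_inert_aux (T : List (List Char × List Char)) (hG : pvGood T) :
    ∀ (v t : List Char), '[' ∉ v → pvScan T (v ++ t) = v ++ pvScan T t := by
  intro v
  induction v with
  | nil => intro t _; simp
  | cons c v' ih =>
    intro t hv
    have hfind : T.find? (fun pr => pr.1.isPrefixOf (c :: (v' ++ t))) = none := by
      apply List.find?_eq_none.mpr
      intro pr hpr
      obtain ⟨⟨b, hp, -, -, -⟩, -⟩ := hG pr hpr
      simp only [List.isPrefixOf_iff_prefix, hp]
      intro hpre
      obtain ⟨hc, -⟩ := List.cons_prefix_cons.mp hpre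
      exact hv (by simp [← hc])
    rw [List.cons_append, pvScan_cons_none T c _ hfind,
      ih t (fun h => hv (List.mem_cons_of_mem _ h))]
    simp

lemma pvScan_inert_rep (T : List (List Char × List Char)) (hG : pvGood T)
    (u t : List Char) (hu : '[' ∉ u) :
    pvScan T (('[' :: '@' :: u) ++ t) = ('[' :: '@' :: u) ++ pvScan T t := by
  have hfind : T.find? (fun pr => pr.1.isPrefixOf ('[' :: ('@' :: u ++ t))) = none := by
    apply List.find?_eq_none.mpr
    intro pr hpr
    obtain ⟨⟨b, hp, hbne, -, hat⟩, -⟩ := hG pr hpr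
    simp only [List.isPrefixOf_iff_prefix, hp]
    intro hpre
    obtain ⟨-, hpre'⟩ := List.cons_prefix_cons.mp hpre
    cases b with
    | nil => exact hbne rfl
    | cons x b' =>
      obtain ⟨hx, -⟩ := List.cons_prefix_cons.mp (by simpa using hpre')
      exact hat (hx ▸ List.mem_cons_self)
  have hnu : '[' ∉ '@' :: u := by
    intro h
    rcases List.mem_cons.mp h with h | h
    · exact absurd h (by decide)
    · exact hu h
  rw [List.cons_append, pvScan_cons_none T _ _ hfind,
    show ('@' :: u ++ t) = ('@' :: u) ++ t by simp,
    pvScan_inert_aux T hG _ t hnu]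
  simp

-- the core commutation: one replace pass absorbed into the scanner's table
lemma pvCore (p r : List Char) (T : List (List Char × List Char))
    (hG : pvGood ((p, r) :: T)) :
    ∀ (n : Nat) (s : List Char), s.length ≤ n →
      pvScan T (pvReplP p r s) = pvScan ((p, r) :: T) s := by
  have hGT : pvGood T := fun pr h => hG pr (List.mem_cons_of_mem _ h)
  obtain ⟨⟨a, hpa, hane, hana, hanat⟩, hrep⟩ := hG (p, r) List.mem_cons_self
  obtain ⟨u, hru, hu⟩ := hrep
  have hpa' : p = '[' :: a ++ [']'] := hpa
  have hru' : r = '[' :: '@' :: u := hru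
  subst hpa'
  subst hru'
  suffices H : ∀ (n : Nat) (s : List Char), s.length ≤ n →
      pvScan T (pvRepl '[' (a ++ [']']) ('[' :: '@' :: u) s) =
      pvScan (('[' :: a ++ [']'], '[' :: '@' :: u) :: T) s by
    intro n s h
    exact H n s h
  intro n
  induction n with
  | zero =>
    intro s h
    have : s = [] := by cases s <;> simp_all
    subst this
    simp [pvRepl_nil, pvScan_nil']
  | succ n ih =>
    intro s hs
    cases s with
    | nil => simp [pvRepl_nil, pvScan_nil']
    | cons c t =>
      rw [pvRepl_cons]
      by_cases hp : ('[' :: (a ++ [']'])).isPrefixOf (c :: t)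
      · -- the pattern matches here: both sides emit r and continue after it
        rw [if_pos hp]
        have hX : (List.drop (a ++ [']']).length t).length ≤ n := by
          have := List.length_drop (l := t) (i := (a ++ [']']).length)
          simp only [List.length_cons] at hs
          omega
        rw [pvScan_inert_rep T hGT u _ hu]
        have hfind : ((('[' :: a ++ [']'], '[' :: '@' :: u) :: T).find?
            (fun pr => pr.1.isPrefixOf (c :: t))) = some ('[' :: a ++ [']'], '[' :: '@' :: u) := by
          apply List.find?_cons_of_pos
          simpa using hp
        rw [pvScan_cons_some _ c t _ hfind]
        have hlen : ('[' :: a ++ [']'], '[' :: '@' :: u).1.length - 1 = (a ++ [']']).length := by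
          simp
        rw [hlen, ih (List.drop (a ++ [']']).length t) hX]
      · -- the pattern does not match here
        rw [if_neg hp]
        have hcong : ∀ pr ∈ T,
            (pr.1.isPrefixOf (c :: pvRepl '[' (a ++ [']']) ('[' :: '@' :: u) t)) =
            (pr.1.isPrefixOf (c :: t)) := by
          intro pr hpr
          obtain ⟨⟨b, hpb, -, hbna, -⟩, -⟩ := hGT pr hpr
          have hnb : '[' ∉ b ++ [']'] := by
            intro h
            rcases List.mem_append.mp h with h | h
            · exact hbna h
            · simp at h
          have hiff := pvPrefix_repl_iff (a ++ [']']) ('@' :: u) t (b ++ [']']) hnb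
          rw [Bool.eq_iff_iff]
          simp only [List.isPrefixOf_iff_prefix, hpb]
          constructor
          · intro hcon
            obtain ⟨hc, hpre⟩ := List.cons_prefix_cons.mp hcon
            exact List.cons_prefix_cons.mpr ⟨hc, hiff.mp hpre⟩
          · intro hcon
            obtain ⟨hc, hpre⟩ := List.cons_prefix_cons.mp hcon
            exact List.cons_prefix_cons.mpr ⟨hc, hiff.mpr hpre⟩
        have hfcong : (T.find? (fun pr => pr.1.isPrefixOf (c :: pvRepl '[' (a ++ [']']) ('[' :: '@' :: u) t))) =
            (T.find? (fun pr => pr.1.isPrefixOf (c :: t))) :=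
          pvFind?_congr T _ _ hcong
        cases hT : T.find? (fun pr => pr.1.isPrefixOf (c :: t)) with
        | none =>
          rw [pvScan_cons_none T c _ (hfcong.trans hT),
            pvScan_cons_none _ c t
              (by rw [List.find?_cons_of_neg (by simpa using hp)]; exact hT)]
          have ht : t.length ≤ n := by simp only [List.length_cons] at hs; omega
          rw [ih t ht]
        | some qr =>
          obtain ⟨⟨b, hqb, hbne, hbna, -⟩, -⟩ :=
            hGT qr (List.mem_of_find?_eq_some hT)
          have hqpre : qr.1 <+: (c :: t) := by
            have := List.find?_some hT
            exact List.isPrefixOf_iff_prefix.mp (by simpa using this)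
          have hnb : '[' ∉ b ++ [']'] := by
            intro h
            rcases List.mem_append.mp h with h | h
            · exact hbna h
            · simp at h
          obtain ⟨hc, hpret⟩ := List.cons_prefix_cons.mp (hqb ▸ hqpre)
          obtain ⟨t2, ht2⟩ := hpret
          simp only [List.append_eq] at ht2
          have hsplit : pvRepl '[' (a ++ [']']) ('[' :: '@' :: u) t =
              (b ++ [']']) ++ pvRepl '[' (a ++ [']']) ('[' :: '@' :: u) t2 :=
            pvRepl_skip (a ++ [']']) ('[' :: '@' :: u) (b ++ [']']) t t2 hnb ht2.symm
          rw [pvScan_cons_some T c _ qr (hfcong.trans hT),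
            pvScan_cons_some _ c t qr
              (by rw [List.find?_cons_of_neg (by simpa using hp)]; exact hT)]
          have hlen : qr.1.length - 1 = (b ++ [']']).length := by simp [hqb]
          have hdrop1 : List.drop (qr.1.length - 1) (pvRepl '[' (a ++ [']']) ('[' :: '@' :: u) t) =
              pvRepl '[' (a ++ [']']) ('[' :: '@' :: u) t2 := by
            rw [hsplit, hlen, List.drop_left]
          have hdrop2 : List.drop (qr.1.length - 1) t = t2 := by
            rw [← ht2, hlen, List.drop_left]
          rw [hdrop1, hdrop2]
          have ht2len : t2.length ≤ n := by
            have hh : t.length = (b ++ [']']).length + t2.length := by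
              rw [← ht2]; simp only [List.length_append, List.length_cons]
            simp only [List.length_cons] at hs
            omega
          rw [ih t2 ht2len]

lemma pvFold_scan (T : List (List Char × List Char)) (hG : pvGood T) :
    ∀ s : List Char, T.foldl (fun a pr => pvReplP pr.1 pr.2 a) s = pvScan T s := by
  induction T with
  | nil => intro s; simp [pvScan_nil_table]
  | cons pr T ih =>
    intro s
    rw [List.foldl_cons,
      ih (fun q h => hG q (List.mem_cons_of_mem _ h))]
    exact pvCore pr.1 pr.2 T (by simpa using hG) s.length s (le_refl _)

-- string-level fold moved to code points
lemma pvFoldA_toList (m : List (String × String)) :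
    ∀ l : String,
      (m.foldl (fun a pr => PySem.Str.replace a pr.1 pr.2) l).toList =
      (m.map (fun pr => (pr.1.toList, pr.2.toList))).foldl
        (fun a pr => PySem.Chars.replace a pr.1 pr.2) l.toList := by
  induction m with
  | nil => intro l; simp
  | cons pr m ih =>
    intro l
    rw [List.foldl_cons, List.map_cons, List.foldl_cons, ih, PySem.Str.toList_replace]

lemma pvFoldC_eq :
    ∀ (m : List (List Char × List Char)), (∀ pr ∈ m, pr.1 ≠ []) →
    ∀ s : List Char,
      m.foldl (fun a pr => PySem.Chars.replace a pr.1 pr.2) s =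
      m.foldl (fun a pr => pvReplP pr.1 pr.2 a) s := by
  intro m
  induction m with
  | nil => intro _ s; rfl
  | cons pr m ih =>
    intro hm s
    obtain ⟨p, rr⟩ := pr
    rw [List.foldl_cons, List.foldl_cons]
    have h1 : p ≠ [] := hm (p, rr) List.mem_cons_self
    cases p with
    | nil => exact absurd rfl h1
    | cons p0 pt =>
      rw [show pvReplP (p0 :: pt) rr s = pvRepl p0 pt rr s from rfl,
        pvChars_replace_eq p0 pt rr s]
      exact ih (fun q h => hm q (List.mem_cons_of_mem _ h)) _

lemma pvMap_table :
    pvCitationMap.map (fun pr => (pr.1.toList, pr.2.toList)) = pvTableB := by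
  rw [pvTableB_eq_lit]; rfl

-- ===== VERDICT (by name: the statement is the Claim_ definition above) =====
theorem replace_citations_spec : Claim_equal_replace_citations := by
  intro line _
  unfold Spec_replace_citations replace_citations_alt
  have h1 : (replace_citations line).toList = pvScan pvTableB line.toList := by
    rw [replace_citations, pvFoldA_toList, pvMap_table,
      pvFoldC_eq pvTableB (by rw [pvTableB_eq_lit]; decide), pvFold_scan pvTableB pvGood_concrete]
  have h2 : replace_citations line = String.ofList ((replace_citations line).toList) := by
    simp
  rw [h2, h1]
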